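-- pv_equiv track=rewrite | github.com/YuanzhongLi/Practice_Competitive_Programming_Python | LeetCode/problems/0718.py | f
-- ===== SOURCE A (Python) =====
-- def f(A, B):
--     N = len(A)
--     M = len(B)
--     ret = 0
--     for i in range(N):
--         alt = 0
--         tmp = 0
--         for j in range(M):
--             a_idx = j+i
--             if a_idx == N: break
--             b_idx = j
--             if A[a_idx] == B[b_idx]:
--                 tmp += 1
--                 ret = max(ret, tmp)
--             else: tmp = 0
--     return ret
-- ===== SOURCE B (Python) =====
-- def f(A, B):
--     M = len(B)
--     dp = [0] * M
--     ret = 0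
--     for i, a in enumerate(A):
--         dp = [(dp[j - 1] + 1 if j else 1) if a == B[j] else 0 for j in range(M)]
--         for v in dp[:min(i, M - 1) + 1]:
--             if v > ret:
--                 ret = v
--     return ret
-- ===== Notes on version B (the rewrite author's own statement) =====
-- stated objective: alternative
-- what changed: A scans each nonnegative diagonal separately (outer loop over A-start index, inner loop along the diagonal with a break); B does a single row-wise pass over A maintaining one 1-D suffix-run DP array over B and taking the running max only over columns j <= i.
import Mathlib
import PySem

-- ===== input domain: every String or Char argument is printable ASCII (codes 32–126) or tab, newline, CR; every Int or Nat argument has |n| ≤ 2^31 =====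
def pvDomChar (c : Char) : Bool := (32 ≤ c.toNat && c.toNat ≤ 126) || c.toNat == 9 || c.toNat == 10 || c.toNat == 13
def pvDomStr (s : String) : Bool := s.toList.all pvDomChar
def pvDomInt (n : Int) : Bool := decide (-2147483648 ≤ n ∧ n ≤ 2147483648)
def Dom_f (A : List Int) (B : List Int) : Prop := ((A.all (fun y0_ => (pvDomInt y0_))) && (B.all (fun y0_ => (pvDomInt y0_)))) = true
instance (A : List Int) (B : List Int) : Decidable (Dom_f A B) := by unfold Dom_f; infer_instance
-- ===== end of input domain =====

-- B replaces A's per-diagonal run scans by a row-wise 1-D suffix-run DP (alternative decomposition, same exact result).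

-- ===== PORT A =====
-- inner 'for j in range(M)' loop with its break, state (ret, tmp)
def fInner (A B : List Int) (i : Nat) : Int → Int → List Nat → Int
  | ret, _tmp, [] => ret
  | ret, tmp, j :: js =>
    if j + i = A.length then ret
    else if A.getD (j + i) 0 = B.getD j 0 then
      fInner A B i (max ret (tmp + 1)) (tmp + 1) js
    else fInner A B i ret 0 js

def f (A : List Int) (B : List Int) : Int :=
  (List.range A.length).foldl (fun ret i => fInner A B i ret 0 (List.range B.length)) 0

-- ===== PORT B =====
-- one row of B's DP comprehension: dp[j] = run length of equal pairs ending at column j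
def fStep (B dp : List Int) (a : Int) : List Int :=
  (List.range B.length).map
    (fun j => if a = B.getD j 0 then (if j = 0 then 1 else dp.getD (j - 1) 0 + 1) else 0)

-- one iteration of B's 'for i, a in enumerate(A)' body, state (dp, ret)
def fPair (A B : List Int) (st : List Int × Int) (i : Nat) : List Int × Int :=
  let dp := fStep B st.1 (A.getD i 0)
  (dp, (dp.take (min i (B.length - 1) + 1)).foldl (fun r v => if v > r then v else r) st.2)

def f_alt (A : List Int) (B : List Int) : Int :=
  ((List.range A.length).foldl (fPair A B) (List.replicate B.length 0, 0)).2

-- ===== PRECONDITION & SPEC =====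
def Spec_f (A : List Int) (B : List Int) (out : Int) : Prop := out = f_alt A B
instance (A : List Int) (B : List Int) (out : Int) : Decidable (Spec_f A B out) := by unfold Spec_f; infer_instance

-- ===== CLAIM (what is proved, stated in full; the proofs are below) =====
def Claim_equal_f : Prop := ∀ (A : List Int) (B : List Int), Dom_f A B → Spec_f A B (f A B)

-- ===== LEMMAS AND PROOFS =====

-- run length of equal pairs ending at cell (i, j): the common value both programs compute
def pvR (A B : List Int) : Nat → Nat → Int
  | 0, j => if A.getD 0 0 = B.getD j 0 then 1 else 0
  | i+1, 0 => if A.getD (i+1) 0 = B.getD 0 0 then 1 else 0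
  | i+1, j+1 => if A.getD (i+1) 0 = B.getD (j+1) 0 then pvR A B i j + 1 else 0

lemma pvR_mismatch (A B : List Int) (i j : Nat) (h : ¬ A.getD i 0 = B.getD j 0) :
    pvR A B i j = 0 := by
  cases i <;> cases j <;> (simp only [pvR]; rw [if_neg h])

lemma fInner_spec (A B : List Int) (i : Nat) :
    ∀ (k j0 : Nat) (ret : Int), 0 ≤ ret → i + j0 ≤ A.length →
    fInner A B i ret (if j0 = 0 then 0 else pvR A B (j0 - 1 + i) (j0 - 1)) (List.range' j0 k) =
    (((List.range' j0 k).filter (fun j => decide (j + i < A.length))).map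
      (fun j => pvR A B (j + i) j)).foldl max ret := by
  intro k
  induction k with
  | zero => intro j0 ret _ _; simp [fInner]
  | succ k ih =>
    intro j0 ret hret hle
    rw [List.range'_succ]
    by_cases hN : j0 + i = A.length
    · have hfil : (j0 :: List.range' (j0+1) k).filter (fun j => decide (j + i < A.length)) = [] := by
        rw [List.filter_eq_nil_iff]
        intro j hj
        simp only [List.mem_cons, List.mem_range'_1] at hj
        simp only [decide_eq_true_eq]
        omega
      rw [hfil]
      simp [fInner, hN]
    · have hlt : j0 + i < A.length := by omega
      have hcons : (j0 :: List.range' (j0+1) k).filter (fun j => decide (j + i < A.length)) =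
          j0 :: (List.range' (j0+1) k).filter (fun j => decide (j + i < A.length)) := by
        simp [List.filter_cons, hlt]
      rw [hcons]
      simp only [fInner, List.map_cons, List.foldl_cons]
      rw [if_neg hN]
      by_cases hm : A.getD (j0 + i) 0 = B.getD j0 0
      · rw [if_pos hm]
        have htmp : (if j0 = 0 then (0:Int) else pvR A B (j0 - 1 + i) (j0 - 1)) + 1 =
            pvR A B (j0 + i) j0 := by
          cases j0 with
          | zero =>
            rw [if_pos rfl]
            simp only [Nat.zero_add] at hm ⊢
            rcases i with _ | n <;> (simp only [pvR]; rw [if_pos hm]; norm_num)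
          | succ t =>
            rw [if_neg (Nat.succ_ne_zero t)]
            simp only [Nat.add_sub_cancel]
            have e : t + 1 + i = (t + i) + 1 := by omega
            rw [e] at hm ⊢
            simp only [pvR]
            rw [if_pos hm]
        rw [htmp]
        have hIH := ih (j0+1) (max ret (pvR A B (j0 + i) j0))
          (le_trans hret (le_max_left _ _)) (by omega)
        rw [if_neg (Nat.succ_ne_zero j0)] at hIH
        simp only [Nat.add_sub_cancel] at hIH
        exact hIH
      · rw [if_neg hm]
        have h0 : pvR A B (j0 + i) j0 = 0 := pvR_mismatch _ _ _ _ hm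
        rw [h0, max_eq_left hret]
        have hIH := ih (j0+1) ret hret (by omega)
        rw [if_neg (Nat.succ_ne_zero j0)] at hIH
        simp only [Nat.add_sub_cancel] at hIH
        rw [h0] at hIH
        exact hIH

lemma fInner_range (A B : List Int) (i : Nat) (ret : Int) (hret : 0 ≤ ret)
    (hi : i ≤ A.length) :
    fInner A B i ret 0 (List.range B.length) =
    (((List.range B.length).filter (fun j => decide (j + i < A.length))).map
      (fun j => pvR A B (j + i) j)).foldl max ret := by
  have h := fInner_spec A B i B.length 0 ret hret (by omega)
  simpa [List.range_eq_range'] using h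

def listA (A B : List Int) : List Int :=
  (List.range A.length).flatMap
    (fun i => ((List.range B.length).filter (fun j => decide (j + i < A.length))).map
      (fun j => pvR A B (j + i) j))

lemma f_fold (A B : List Int) :
    ∀ (l : List Nat) (ret : Int), 0 ≤ ret → (∀ i ∈ l, i < A.length) →
    l.foldl (fun ret i => fInner A B i ret 0 (List.range B.length)) ret =
    (l.flatMap (fun i => ((List.range B.length).filter (fun j => decide (j + i < A.length))).map
      (fun j => pvR A B (j + i) j))).foldl max ret := by
  intro l
  induction l with
  | nil => intro ret _ _; simp
  | cons i l ih =>
    intro ret hret hmem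
    simp only [List.foldl_cons, List.flatMap_cons, List.foldl_append]
    rw [fInner_range A B i ret hret (le_of_lt (hmem i (List.mem_cons_self)))]
    exact ih _ (le_trans hret (PySem.List.le_foldl_max _ _).1) (fun j hj => hmem j (List.mem_cons_of_mem _ hj))

lemma f_eq (A B : List Int) : f A B = (listA A B).foldl max 0 :=
  f_fold A B (List.range A.length) 0 le_rfl (fun i hi => List.mem_range.mp hi)

-- B side
def cellsB (A B : List Int) (i : Nat) : List Int :=
  (List.range (min (i+1) B.length)).map (fun j => pvR A B i j)

lemma getD_map_range (g : Nat → Int) (M t : Nat) (ht : t < M) :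
    ((List.range M).map g).getD t 0 = g t := by
  simp [List.getD_eq_getElem?_getD, List.getElem?_map, List.getElem?_range, ht]

lemma fStep_zero (A B : List Int) :
    fStep B (List.replicate B.length 0) (A.getD 0 0) =
    (List.range B.length).map (fun j => pvR A B 0 j) := by
  unfold fStep
  apply List.map_congr_left
  intro j hj
  cases j with
  | zero => simp [pvR]
  | succ t =>
    have : (List.replicate B.length (0:Int)).getD t 0 = 0 := by
      simp [List.getD_eq_getElem?_getD, List.getElem?_replicate]
      split <;> rfl
    simp [pvR, this]

lemma fStep_succ (A B : List Int) (i : Nat) :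
    fStep B ((List.range B.length).map (fun j => pvR A B i j)) (A.getD (i+1) 0) =
    (List.range B.length).map (fun j => pvR A B (i+1) j) := by
  unfold fStep
  apply List.map_congr_left
  intro j hj
  have hjM : j < B.length := List.mem_range.mp hj
  cases j with
  | zero => simp [pvR]
  | succ t =>
    have ht : t < B.length := by omega
    have hg : ((List.range B.length).map (fun j => pvR A B i j)).getD t 0 = pvR A B i t :=
      getD_map_range _ _ _ ht
    simp only [Nat.add_sub_cancel]
    rw [if_neg (Nat.succ_ne_zero t), hg]
    simp only [pvR]

lemma if_gt_max (r v : Int) : (if v > r then v else r) = max r v := by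
  split_ifs with h
  · exact (max_eq_right (le_of_lt h)).symm
  · exact (max_eq_left (not_lt.mp h)).symm

lemma take_row (A B : List Int) (i : Nat) :
    (((List.range B.length).map (fun j => pvR A B i j)).take (min i (B.length - 1) + 1)) =
    cellsB A B i := by
  rw [← List.map_take, List.take_range]
  unfold cellsB
  have : min (min i (B.length - 1) + 1) B.length = min (i+1) B.length := by omega
  rw [this]

lemma alt_spec (A B : List Int) :
    ∀ (k i : Nat) (ret : Int) (dp : List Int),
    (dp = if i = 0 then List.replicate B.length (0:Int)
          else (List.range B.length).map (fun j => pvR A B (i-1) j)) →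
    ((List.range' i k).foldl (fPair A B) (dp, ret)).2 =
    ((List.range' i k).flatMap (cellsB A B)).foldl max ret := by
  intro k
  induction k with
  | zero => intro i ret dp _; simp
  | succ k ih =>
    intro i ret dp hdp
    rw [List.range'_succ]
    simp only [List.foldl_cons, List.flatMap_cons, List.foldl_append]
    have hdp' : fStep B dp (A.getD i 0) = (List.range B.length).map (fun j => pvR A B i j) := by
      cases i with
      | zero => rw [hdp, if_pos rfl]; exact fStep_zero A B
      | succ i' =>
        rw [hdp, if_neg (Nat.succ_ne_zero i')]
        simp only [Nat.add_sub_cancel]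
        exact fStep_succ A B i'
    have hp : fPair A B (dp, ret) i =
        ((List.range B.length).map (fun j => pvR A B i j), (cellsB A B i).foldl max ret) := by
      unfold fPair
      rw [hdp']
      refine Prod.ext rfl ?_
      show (((List.range B.length).map (fun j => pvR A B i j)).take
          (min i (B.length - 1) + 1)).foldl (fun r v => if v > r then v else r) ret = _
      rw [take_row]
      exact PySem.List.foldl_congr_mem _ _ _ _ (fun acc x _ => if_gt_max acc x)
    rw [hp]
    exact ih (i+1) _ _ (by simp)

lemma f_alt_eq (A B : List Int) :
    f_alt A B = ((List.range A.length).flatMap (cellsB A B)).foldl max 0 := by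
  unfold f_alt
  rw [List.range_eq_range']
  exact alt_spec A B A.length 0 0 _ (by simp)

lemma mem_listA_iff (A B : List Int) (x : Int) :
    x ∈ listA A B ↔ ∃ i j : Nat, i < A.length ∧ j < B.length ∧ j ≤ i ∧ x = pvR A B i j := by
  simp only [listA, List.mem_flatMap, List.mem_map, List.mem_filter, List.mem_range,
    decide_eq_true_eq]
  constructor
  · rintro ⟨i0, hi0, j, ⟨hj, hlt⟩, rfl⟩
    exact ⟨j + i0, j, by omega, hj, by omega, rfl⟩
  · rintro ⟨i, j, hi, hj, hle, rfl⟩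
    refine ⟨i - j, by omega, j, ⟨hj, by omega⟩, ?_⟩
    congr 1
    omega

lemma mem_listB_iff (A B : List Int) (x : Int) :
    x ∈ (List.range A.length).flatMap (cellsB A B) ↔
    ∃ i j : Nat, i < A.length ∧ j < B.length ∧ j ≤ i ∧ x = pvR A B i j := by
  simp only [cellsB, List.mem_flatMap, List.mem_map, List.mem_range]
  constructor
  · rintro ⟨i, hi, j, hj, rfl⟩
    exact ⟨i, j, hi, by omega, by omega, rfl⟩
  · rintro ⟨i, j, hi, hj, hle, rfl⟩
    exact ⟨i, hi, j, by omega, rfl⟩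

lemma foldl_max_same (l1 l2 : List Int) (a : Int) (h : ∀ x, x ∈ l1 ↔ x ∈ l2) :
    l1.foldl max a = l2.foldl max a := by
  have h1 := PySem.List.le_foldl_max l1 a
  have h2 := PySem.List.le_foldl_max l2 a
  apply le_antisymm
  · rcases PySem.List.foldl_max_mem l1 a with e | m
    · rw [e]; exact h2.1
    · exact h2.2 _ ((h _).mp m)
  · rcases PySem.List.foldl_max_mem l2 a with e | m
    · rw [e]; exact h1.1
    · exact h1.2 _ ((h _).mpr m)

-- ===== VERDICT (by name: the statement is the Claim_ definition above) =====
theorem f_spec : Claim_equal_f := by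
  intro A B _
  show f A B = f_alt A B
  rw [f_eq, f_alt_eq]
  exact foldl_max_same _ _ _ (fun x => (mem_listA_iff A B x).trans (mem_listB_iff A B x).symm)
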